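-- pv_equiv track=rewrite | github.com/asrofilnadib/Struktur-Data-Munawar | Sesi 14 Dynamic Programming/Tugas.py | offeringNumber
-- ===== SOURCE A (Python) =====
-- from typing import List
--
-- class Temple:
--     def __init__(self, l: int, r: int):
--         self.L = l
--         self.R = r
--
-- def offeringNumber(n: int, heightTemple: List[int]) -> int:
--     chainSize = [0] * n
--
--     for i in range(n):
--         chainSize[i] = Temple(-1, -1)
--
--     chainSize[0].L = 1
--     chainSize[-1].R = 1
--
--     for i in range(1, n):
--         if heightTemple[i - 1] < heightTemple[i]:
--             chainSize[i].L = chainSize[i - 1].L + 1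
--         else:
--             chainSize[i].L = 1
--
--     for i in range(n - 2, -1, -1):
--         if heightTemple[i + 1] < heightTemple[i]:
--             chainSize[i].R = chainSize[i + 1].R + 1
--         else:
--             chainSize[i].R = 1
--
--     sm = 0
--     for i in range(n):
--         sm += max(chainSize[i].L,
--                   chainSize[i].R)
--     return sm
-- ===== SOURCE B (Python) =====
-- def offeringNumber(n, heightTemple):
--     # single fused pass: track ascending run (up), descending run (down) and the
--     # L-value at the last peak; total accumulates sum(max(L, R)) on the fly.
--     up, down, peak, total = 1, 0, 1, 1
--     for i in range(1, n):
--         prev, cur = heightTemple[i - 1], heightTemple[i]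
--         if prev < cur:
--             up += 1
--             down = 0
--             peak = up
--             total += up
--         elif prev == cur:
--             up = 1
--             down = 0
--             peak = 1
--             total += 1
--         else:
--             up = 1
--             down += 1
--             total += down + (1 if peak <= down else 0)
--     return total
-- ===== Notes on version B (the rewrite author's own statement) =====
-- stated objective: faster
-- what changed: Replaces the two O(n) arrays of Temple objects (forward L pass, backward R pass, then a third summation pass) by the classic single fused pass that keeps only the current ascending-run length, descending-run length and last peak height in O(1) extra space.
import Mathlib
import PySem

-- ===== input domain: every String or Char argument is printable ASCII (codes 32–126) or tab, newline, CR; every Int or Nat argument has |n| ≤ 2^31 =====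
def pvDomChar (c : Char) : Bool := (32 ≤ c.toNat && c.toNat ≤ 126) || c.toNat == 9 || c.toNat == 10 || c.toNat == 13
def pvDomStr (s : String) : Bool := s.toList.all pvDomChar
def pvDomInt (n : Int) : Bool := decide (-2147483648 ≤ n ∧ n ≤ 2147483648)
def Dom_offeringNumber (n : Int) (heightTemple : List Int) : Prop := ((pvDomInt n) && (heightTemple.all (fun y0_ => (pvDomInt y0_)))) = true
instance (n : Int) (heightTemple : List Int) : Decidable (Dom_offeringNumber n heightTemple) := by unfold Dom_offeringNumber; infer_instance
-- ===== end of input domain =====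

-- B replaces A's two Temple-object arrays (forward L pass, backward R pass, third summation
-- pass) by one fused left-to-right pass keeping only the current ascending/descending run
-- lengths and the last peak value in O(1) extra space.

-- ===== PORT A =====
structure PVTemple where
  L : Int
  R : Int
deriving DecidableEq, Repr

def pvA0 (n : Int) : List PVTemple :=
  (PySem.List.pyRange 0 n 1).foldl (fun cs i => PySem.List.pySetD cs i ⟨-1, -1⟩)
    (List.replicate n.toNat ⟨0, 0⟩)

def pvA1 (n : Int) : List PVTemple :=
  PySem.List.pySetD (pvA0 n) 0 { PySem.List.pyGetD (pvA0 n) 0 ⟨-1, -1⟩ with L := 1 }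

def pvA2 (n : Int) : List PVTemple :=
  PySem.List.pySetD (pvA1 n) (-1) { PySem.List.pyGetD (pvA1 n) (-1) ⟨-1, -1⟩ with R := 1 }

def pvA3 (n : Int) (heightTemple : List Int) : List PVTemple :=
  (PySem.List.pyRange 1 n 1).foldl (fun cs i =>
    PySem.List.pySetD cs i { PySem.List.pyGetD cs i ⟨-1, -1⟩ with L :=
      if (PySem.List.pyGetD heightTemple (i - 1) 0 < PySem.List.pyGetD heightTemple i 0) then
        (PySem.List.pyGetD cs (i - 1) ⟨-1, -1⟩).L + 1
      else 1 }) (pvA2 n)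

def pvA4 (n : Int) (heightTemple : List Int) : List PVTemple :=
  (PySem.List.pyRange (n - 2) (-1) (-1)).foldl (fun cs i =>
    PySem.List.pySetD cs i { PySem.List.pyGetD cs i ⟨-1, -1⟩ with R :=
      if (PySem.List.pyGetD heightTemple (i + 1) 0 < PySem.List.pyGetD heightTemple i 0) then
        (PySem.List.pyGetD cs (i + 1) ⟨-1, -1⟩).R + 1
      else 1 }) (pvA3 n heightTemple)

def offeringNumber (n : Int) (heightTemple : List Int) : Int :=
  (PySem.List.pyRange 0 n 1).foldl (fun sm i =>
    sm + max (PySem.List.pyGetD (pvA4 n heightTemple) i ⟨-1, -1⟩).L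
             (PySem.List.pyGetD (pvA4 n heightTemple) i ⟨-1, -1⟩).R) 0


-- ===== PORT B =====
-- single fused pass; state = (up, down, peak, total)
def offeringNumber_alt (n : Int) (heightTemple : List Int) : Int :=
  ((PySem.List.pyRange 1 n 1).foldl (fun (st : Int × Int × Int × Int) i =>
    let prev := PySem.List.pyGetD heightTemple (i - 1) 0
    let cur := PySem.List.pyGetD heightTemple i 0
    if prev < cur then (st.1 + 1, 0, st.1 + 1, st.2.2.2 + (st.1 + 1))
    else if prev = cur then (1, 0, 1, st.2.2.2 + 1)
    else (1, st.2.1 + 1, st.2.2.1,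
          st.2.2.2 + (st.2.1 + 1) + (if st.2.2.1 ≤ st.2.1 + 1 then 1 else 0)))
    (1, 0, 1, 1)).2.2.2

-- ===== PRECONDITION & SPEC =====
-- Pre_ is exactly where the Python A returns: n ≥ 1 (for n ≤ 0 the access chainSize[0]
-- raises IndexError) and the first n temples exist (heightTemple[i], 0 ≤ i < n, raises
-- IndexError otherwise — except that n = 1 reads no heights at all).
def Pre_offeringNumber (n : Int) (heightTemple : List Int) : Prop :=
  1 ≤ n ∧ (n ≤ (heightTemple.length : Int) ∨ n = 1)
instance (n : Int) (heightTemple : List Int) : Decidable (Pre_offeringNumber n heightTemple) := by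
  unfold Pre_offeringNumber; infer_instance

def pvWitness_offeringNumber : Int × List Int := (5, [1, 2, 2, 3, 1])

def Spec_offeringNumber (n : Int) (heightTemple : List Int) (out : Int) : Prop :=
  out = offeringNumber_alt n heightTemple
instance (n : Int) (heightTemple : List Int) (out : Int) :
    Decidable (Spec_offeringNumber n heightTemple out) := by
  unfold Spec_offeringNumber; infer_instance

-- ===== CLAIM (what is proved, stated in full; the proofs are below) =====
def Claim_equal_offeringNumber : Prop := ∀ (n : Int) (heightTemple : List Int),
  Dom_offeringNumber n heightTemple → Pre_offeringNumber n heightTemple →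
  Spec_offeringNumber n heightTemple (offeringNumber n heightTemple)

-- ===== LEMMAS AND PROOFS =====

-- h j = heightTemple[j] (in-range under Pre_; default 0 otherwise, read by neither program there)
def pvH (ht : List Int) (j : Nat) : Int := ht.getD j 0

def pvL (h : Nat → Int) : Nat → Int
  | 0 => 1
  | i + 1 => if h i < h (i + 1) then pvL h i + 1 else 1
def pvD (h : Nat → Int) : Nat → Nat
  | 0 => 0
  | i + 1 => if h (i + 1) < h i then pvD h i + 1 else 0
def pvR (h : Nat → Int) (e j : Nat) : Int :=
  if _hj : j < e then (if h (j + 1) < h j then pvR h e (j + 1) + 1 else 1) else 1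
termination_by e - j
decreasing_by omega
def pvT (h : Nat → Int) (i : Nat) : Int :=
  ∑ j ∈ Finset.range (i + 1), max (pvL h j) (pvR h i j)

theorem pvL_ge_one (h : Nat → Int) (i : Nat) : 1 ≤ pvL h i := by
  cases i with
  | zero => simp [pvL]
  | succ i =>
    have := pvL_ge_one h i
    simp only [pvL]
    split_ifs with hc <;> omega

theorem pvD_le (h : Nat → Int) (i : Nat) : pvD h i ≤ i := by
  induction i with
  | zero => simp [pvD]
  | succ i ih => simp only [pvD]; split_ifs <;> omega

theorem pvR_of_ge (h : Nat → Int) (e j : Nat) (hj : e ≤ j) : pvR h e j = 1 := by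
  rw [pvR]; simp [Nat.not_lt.mpr hj]

theorem pvR_of_lt (h : Nat → Int) (e j : Nat) (hj : j < e) :
    pvR h e j = if h (j + 1) < h j then pvR h e (j + 1) + 1 else 1 := by
  rw [pvR]; simp [hj]

theorem pvRun_desc (h : Nat → Int) (i k : Nat) (hk : k < pvD h i) :
    h (i - k) < h (i - k - 1) := by
  induction i generalizing k with
  | zero => simp [pvD] at hk
  | succ i ih =>
    simp only [pvD] at hk
    split_ifs at hk with hc
    · cases k with
      | zero => simpa using hc
      | succ k =>
        have := ih k (by omega)
        have e1 : i + 1 - (k + 1) = i - k := by omega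
        rw [e1]; exact this
    · omega

theorem pvRun_L (h : Nat → Int) (i k : Nat) (hk : k < pvD h i) : pvL h (i - k) = 1 := by
  have hd := pvRun_desc h i k hk
  have hle := pvD_le h i
  have h1 : 1 ≤ i - k := by omega
  have e1 : i - k = (i - k - 1) + 1 := by omega
  rw [e1]
  simp only [pvL]
  rw [if_neg]
  rw [← e1]
  exact not_lt.mpr (le_of_lt hd)

theorem pvRun_R (h : Nat → Int) (i k : Nat) (hk : k ≤ pvD h i) :
    pvR h i (i - k) = (k : Int) + 1 := by
  induction k with
  | zero => simp [pvR_of_ge h i i le_rfl]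
  | succ k ih =>
    have hle := pvD_le h i
    have hlt : i - (k + 1) < i := by omega
    rw [pvR_of_lt h i _ hlt]
    have e1 : i - (k + 1) + 1 = i - k := by omega
    have hd : h (i - k) < h (i - k - 1) := pvRun_desc h i k (by omega)
    have e2 : i - k - 1 = i - (k + 1) := by omega
    rw [e1, if_pos (by rw [← e2]; exact hd), ih (by omega)]
    push_cast; ring

theorem pvRun_start (h : Nat → Int) (i : Nat) :
    i - pvD h i = 0 ∨ ¬ h (i - pvD h i) < h (i - pvD h i - 1) := by
  induction i with
  | zero => left; rfl
  | succ i ih =>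
    simp only [pvD]
    split_ifs with hc
    · have hle := pvD_le h i
      have e1 : i + 1 - (pvD h i + 1) = i - pvD h i := by omega
      rw [e1]; exact ih
    · right
      simp only [Nat.sub_zero, Nat.add_sub_cancel]
      exact hc

theorem pvR_congr (h : Nat → Int) (e₁ e₂ m : Nat) (h1 : m ≤ e₁) (h2 : m ≤ e₂)
    (hm : pvR h e₁ m = pvR h e₂ m) : ∀ j, j ≤ m → pvR h e₁ j = pvR h e₂ j := by
  have key : ∀ d, pvR h e₁ (m - d) = pvR h e₂ (m - d) := by
    intro d
    induction d with
    | zero => simpa using hm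
    | succ d ih =>
      by_cases hd : m ≤ d
      · have : m - (d + 1) = m - d := by omega
        rw [this]; exact ih
      · have hlt1 : m - (d + 1) < e₁ := by omega
        have hlt2 : m - (d + 1) < e₂ := by omega
        rw [pvR_of_lt h e₁ _ hlt1, pvR_of_lt h e₂ _ hlt2]
        have e1 : m - (d + 1) + 1 = m - d := by omega
        rw [e1, ih]
  intro j hj
  have := key (m - j)
  rwa [Nat.sub_sub_self hj] at this

theorem pvR_stable (h : Nat → Int) (i : Nat) (hnd : ¬ h (i + 1) < h i) :
    ∀ j, j ≤ i → pvR h (i + 1) j = pvR h i j := by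
  apply pvR_congr h (i + 1) i i (by omega) le_rfl
  rw [pvR_of_lt h (i + 1) i (by omega), if_neg hnd, pvR_of_ge h i i le_rfl]

theorem pv_sum_gt (a m : Nat) :
    ∑ j ∈ Finset.range (a + 1 + m), (if a < j then (1 : Int) else 0) = m := by
  induction m with
  | zero =>
    apply Finset.sum_eq_zero
    intro j hj
    simp only [Finset.mem_range] at hj
    rw [if_neg (by omega)]
  | succ m ih =>
    have : a + 1 + (m + 1) = (a + 1 + m) + 1 := by omega
    rw [this, Finset.sum_range_succ, ih, if_pos (by omega)]
    push_cast; ring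

theorem pvT_step_congr (h : Nat → Int) (i : Nat) (hnd : ¬ h (i + 1) < h i) :
    pvT h (i + 1) = pvT h i + pvL h (i + 1) := by
  unfold pvT
  rw [Finset.sum_range_succ]
  rw [pvR_of_ge h (i + 1) (i + 1) le_rfl]
  rw [max_eq_left (pvL_ge_one h (i + 1))]
  congr 1
  apply Finset.sum_congr rfl
  intro j hj
  simp only [Finset.mem_range] at hj
  rw [pvR_stable h i hnd j (by omega)]

theorem pvT_step_up (h : Nat → Int) (i : Nat) (hc : h i < h (i + 1)) :
    pvT h (i + 1) = pvT h i + pvL h (i + 1) :=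
  pvT_step_congr h i (by omega)

theorem pvT_step_eq (h : Nat → Int) (i : Nat) (hc : h i = h (i + 1)) :
    pvT h (i + 1) = pvT h i + 1 := by
  have := pvT_step_congr h i (by omega)
  have hL : pvL h (i + 1) = 1 := by simp only [pvL]; rw [if_neg (by omega)]
  rw [this, hL]

theorem pvT_step_down (h : Nat → Int) (i : Nat) (hc : h (i + 1) < h i) :
    pvT h (i + 1) = pvT h i + ((pvD h i : Int) + 1)
      + (if pvL h (i - pvD h i) ≤ (pvD h i : Int) + 1 then 1 else 0) := by
  have hdle := pvD_le h i
  set d := pvD h i with hd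
  set p := i - d with hp
  have hD1 : pvD h (i + 1) = d + 1 := by simp only [pvD]; rw [if_pos hc]
  have hL1 : pvL h (i + 1) = 1 := by simp only [pvL]; rw [if_neg (by omega)]
  unfold pvT
  rw [Finset.sum_range_succ, pvR_of_ge h (i + 1) (i + 1) le_rfl, hL1]
  have key : ∀ j ∈ Finset.range (i + 1),
      max (pvL h j) (pvR h (i + 1) j) = max (pvL h j) (pvR h i j)
        + ((if j = p then (if pvL h p ≤ (d : Int) + 1 then 1 else 0) else 0)
           + (if p < j then (1 : Int) else 0)) := by
    intro j hj
    simp only [Finset.mem_range] at hj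
    rcases lt_trichotomy j p with hjp | hjp | hjp
    · -- below the run: R unchanged
      have hp1 : 1 ≤ p := by omega
      have hstart := pvRun_start h i
      have hns : ¬ h p < h (p - 1) := by
        rcases hstart with h0 | h0
        · omega
        · exact h0
      have hRc : pvR h (i + 1) (p - 1) = pvR h i (p - 1) := by
        rw [pvR_of_lt h (i + 1) (p - 1) (by omega), pvR_of_lt h i (p - 1) (by omega)]
        have e1 : p - 1 + 1 = p := by omega
        rw [e1, if_neg hns, if_neg hns]
      rw [pvR_congr h (i + 1) i (p - 1) (by omega) (by omega) hRc j (by omega)]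
      rw [if_neg (by omega), if_neg (by omega)]
      ring
    · -- the peak
      subst hjp
      have hRi : pvR h i p = (d : Int) + 1 := by
        have := pvRun_R h i d le_rfl
        rwa [← hp] at this
      have hRi1 : pvR h (i + 1) p = (d : Int) + 2 := by
        have := pvRun_R h (i + 1) (d + 1) (by rw [hD1])
        have e1 : i + 1 - (d + 1) = p := by omega
        rw [e1] at this
        rw [this]; push_cast; ring
      rw [hRi, hRi1, if_pos rfl, if_neg (show ¬ p < p by omega)]
      rcases le_or_gt (pvL h p) ((d : Int) + 1) with hle | hlt
      · rw [if_pos hle, max_eq_right (by omega), max_eq_right hle]; ring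
      · rw [if_neg (by omega), max_eq_left (by omega), max_eq_left (by omega)]; ring
    · -- inside the descending run
      have hk : i - j < d := by omega
      have ej : i - (i - j) = j := by omega
      have hLj : pvL h j = 1 := by have := pvRun_L h i (i - j) hk; rwa [ej] at this
      have hRj : pvR h i j = ((i - j : Nat) : Int) + 1 := by
        have := pvRun_R h i (i - j) (by omega); rwa [ej] at this
      have hRj1 : pvR h (i + 1) j = ((i - j : Nat) : Int) + 2 := by
        have := pvRun_R h (i + 1) (i - j + 1) (by omega)
        have e1 : i + 1 - (i - j + 1) = j := by omega
        rw [e1] at this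
        rw [this]; push_cast; ring
      rw [hLj, hRj, hRj1, if_neg (by omega), if_pos hjp]
      rw [max_eq_right (by omega), max_eq_right (by omega)]
      ring
  rw [Finset.sum_congr rfl key, Finset.sum_add_distrib, Finset.sum_add_distrib]
  rw [Finset.sum_ite_eq' (Finset.range (i + 1)) p
        (fun _ => if pvL h p ≤ (d : Int) + 1 then (1 : Int) else 0)]
  rw [if_pos (Finset.mem_range.mpr (by omega))]
  have e2 : i + 1 = p + 1 + d := by omega
  rw [e2, pv_sum_gt p d, max_self]
  ring

theorem pvB_invariant (ht : List Int) (m : Nat) :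
    (List.range m).foldl (fun (st : Int × Int × Int × Int) (k : Nat) =>
      let prev := PySem.List.pyGetD ht ((1 + (k : Int)) - 1) 0
      let cur := PySem.List.pyGetD ht (1 + (k : Int)) 0
      if prev < cur then (st.1 + 1, 0, st.1 + 1, st.2.2.2 + (st.1 + 1))
      else if prev = cur then (1, 0, 1, st.2.2.2 + 1)
      else (1, st.2.1 + 1, st.2.2.1,
            st.2.2.2 + (st.2.1 + 1) + (if st.2.2.1 ≤ st.2.1 + 1 then 1 else 0)))
      (1, 0, 1, 1)
    = (pvL (pvH ht) m, ((pvD (pvH ht) m : Nat) : Int),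
       pvL (pvH ht) (m - pvD (pvH ht) m), pvT (pvH ht) m) := by
  set h := pvH ht with hh
  induction m with
  | zero =>
    simp only [List.range_zero, List.foldl_nil, pvL, pvD, pvT]
    rw [Finset.sum_range_succ, Finset.sum_range_zero, pvR_of_ge h 0 0 le_rfl]
    simp [pvL]
  | succ m ih =>
    rw [List.range_succ, List.foldl_append, List.foldl_cons, List.foldl_nil, ih]
    have eidx : (1 + (m : Int)) - 1 = ((m : Nat) : Int) := by omega
    have eidx2 : (1 + (m : Int)) = (((m + 1 : Nat)) : Int) := by omega
    have hprev : PySem.List.pyGetD ht ((1 + (m : Int)) - 1) 0 = h m := by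
      rw [eidx, PySem.List.pyGetD_natCast]; rfl
    have hcur : PySem.List.pyGetD ht (1 + (m : Int)) 0 = h (m + 1) := by
      rw [eidx2, PySem.List.pyGetD_natCast]; rfl
    simp only [hprev, hcur]
    rcases lt_trichotomy (h m) (h (m + 1)) with hlt | heq | hgt
    · rw [if_pos hlt]
      have hL : pvL h (m + 1) = pvL h m + 1 := by simp only [pvL]; rw [if_pos hlt]
      have hD : pvD h (m + 1) = 0 := by simp only [pvD]; rw [if_neg (by omega)]
      simp only [Prod.mk.injEq]
      refine ⟨hL.symm, by rw [hD]; simp, ?_, ?_⟩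
      · rw [hD, Nat.sub_zero, hL]
      · rw [pvT_step_up h m hlt, hL]
    · rw [if_neg (by omega), if_pos heq]
      have hL : pvL h (m + 1) = 1 := by simp only [pvL]; rw [if_neg (by omega)]
      have hD : pvD h (m + 1) = 0 := by simp only [pvD]; rw [if_neg (by omega)]
      simp only [Prod.mk.injEq]
      refine ⟨hL.symm, by rw [hD]; simp, ?_, ?_⟩
      · rw [hD, Nat.sub_zero, hL]
      · rw [pvT_step_eq h m heq]
    · rw [if_neg (by omega), if_neg (by omega)]
      have hL : pvL h (m + 1) = 1 := by simp only [pvL]; rw [if_neg (by omega)]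
      have hD : pvD h (m + 1) = pvD h m + 1 := by simp only [pvD]; rw [if_pos hgt]
      have hdle := pvD_le h m
      simp only [Prod.mk.injEq]
      refine ⟨hL.symm, by rw [hD]; push_cast; ring, ?_, ?_⟩
      · rw [hD]
        congr 1
        omega
      · rw [pvT_step_down h m hgt]
  
theorem offeringNumber_alt_eq_pvT (n : Int) (ht : List Int) (hn : 1 ≤ n) :
    offeringNumber_alt n ht = pvT (pvH ht) (n.toNat - 1) := by
  unfold offeringNumber_alt
  rw [PySem.List.pyRange_one 1 n, List.foldl_map]
  have e1 : (n - 1).toNat = n.toNat - 1 := by omega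
  rw [e1, pvB_invariant ht (n.toNat - 1)]

theorem pvA_foldl_length {γ : Type} (l : List γ) (step : List PVTemple → γ → List PVTemple)
    (hstep : ∀ cs i, (step cs i).length = cs.length) (cs : List PVTemple) :
    (l.foldl step cs).length = cs.length := by
  induction l generalizing cs with
  | nil => rfl
  | cons x xs ih => rw [List.foldl_cons, ih, hstep]

theorem pvSetD_neg_one {α : Type} (xs : List α) (v : α) (hx : xs ≠ []) :
    PySem.List.pySetD xs (-1) v = PySem.List.pySetD xs ((xs.length - 1 : Nat) : Int) v := by
  have h0 : 0 < xs.length := List.length_pos_iff.mpr hx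
  simp [PySem.List.pySetD, PySem.List.pySet?, PySem.List.pyIdx?]
  split_ifs with h1
  · rfl
  · omega

theorem pvA0_length (n : Int) : (pvA0 n).length = n.toNat := by
  unfold pvA0
  rw [pvA_foldl_length _ _ (fun cs i => PySem.List.length_pySetD cs i ⟨-1, -1⟩),
      List.length_replicate]

theorem pvA0_get_inv (n : Int) (m : Nat) (hm : m ≤ n.toNat) (j : Nat)
    (hj : j < n.toNat) :
    PySem.List.pyGetD ((List.range m).foldl
        (fun cs (k : Nat) => PySem.List.pySetD cs (k : Int) ⟨-1, -1⟩)
        (List.replicate n.toNat ⟨0, 0⟩)) (j : Int) ⟨-1, -1⟩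
      = if j < m then (⟨-1, -1⟩ : PVTemple) else (⟨0, 0⟩ : PVTemple) := by
  induction m with
  | zero =>
    rw [List.range_zero, List.foldl_nil, if_neg (by omega), PySem.List.pyGetD_natCast,
        List.getD_eq_getElem?_getD, List.getElem?_replicate]
    rw [if_pos hj]
    rfl
  | succ m ih =>
    rw [List.range_succ, List.foldl_append, List.foldl_cons, List.foldl_nil]
    rw [PySem.List.pyGetD_pySetD_natCast]
    · rw [ih (by omega)]
      by_cases hjm : j = m
      · subst hjm
        rw [if_pos (by exact_mod_cast rfl), if_pos (by omega)]
      · rw [if_neg (by exact_mod_cast hjm)]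
        by_cases hlt : j < m
        · rw [if_pos hlt, if_pos (by omega)]
        · rw [if_neg hlt, if_neg (by omega)]
    · rw [pvA_foldl_length _ _ (fun cs (k : Nat) => PySem.List.length_pySetD cs (k : Int) ⟨-1, -1⟩),
          List.length_replicate]
      omega

theorem pvA0_get (n : Int) (j : Nat) (hj : j < n.toNat) :
    PySem.List.pyGetD (pvA0 n) (j : Int) ⟨-1, -1⟩ = (⟨-1, -1⟩ : PVTemple) := by
  unfold pvA0
  have hnn : n = ((n.toNat : Nat) : Int) := by omega
  rw [hnn, PySem.List.pyRange_zero_natCast, List.foldl_map]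
  rw [← hnn]
  have := pvA0_get_inv n n.toNat le_rfl j hj
  rw [this, if_pos hj]

theorem pvA1_get (n : Int) (_hn : 1 ≤ n) (j : Nat) (hj : j < n.toNat) :
    PySem.List.pyGetD (pvA1 n) (j : Int) ⟨-1, -1⟩ =
      (⟨if j = 0 then 1 else -1, -1⟩ : PVTemple) := by
  have h0 : PySem.List.pyGetD (pvA0 n) 0 ⟨-1, -1⟩ = (⟨-1, -1⟩ : PVTemple) := by
    have := pvA0_get n 0 (by omega)
    simpa using this
  unfold pvA1
  rw [h0]
  rw [show (0 : Int) = ((0 : Nat) : Int) from rfl, PySem.List.pyGetD_pySetD_natCast]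
  · by_cases hj0 : j = 0
    · subst hj0; rw [if_pos (by norm_num), if_pos rfl]
    · rw [if_neg (by exact_mod_cast hj0), if_neg hj0, pvA0_get n j hj]
  · rw [pvA0_length]; omega

theorem pvA1_length (n : Int) : (pvA1 n).length = n.toNat := by
  unfold pvA1
  rw [PySem.List.length_pySetD, pvA0_length]

theorem pvA1_ne_nil (n : Int) (hn : 1 ≤ n) : pvA1 n ≠ [] := by
  intro hcon
  have := pvA1_length n
  rw [hcon] at this
  simp at this
  omega

theorem pvA2_get (n : Int) (hn : 1 ≤ n) (j : Nat) (hj : j < n.toNat) :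
    PySem.List.pyGetD (pvA2 n) (j : Int) ⟨-1, -1⟩ =
      (⟨if j = 0 then 1 else -1, if j = n.toNat - 1 then 1 else -1⟩ : PVTemple) := by
  have hne := pvA1_ne_nil n hn
  have hlast : PySem.List.pyGetD (pvA1 n) (-1) ⟨-1, -1⟩ =
      (⟨if n.toNat - 1 = 0 then 1 else -1, -1⟩ : PVTemple) := by
    rw [PySem.List.pyGetD_neg_one (pvA1 n) ⟨-1, -1⟩ hne, List.getLast_eq_getElem]
    have h2 := pvA1_get n hn (n.toNat - 1) (by omega)
    rw [PySem.List.pyGetD_natCast] at h2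
    rw [← List.getD_eq_getElem _ ⟨-1, -1⟩ (by rw [pvA1_length]; omega)]
    rw [pvA1_length]
    exact h2
  unfold pvA2
  rw [pvSetD_neg_one _ _ hne, pvA1_length, PySem.List.pyGetD_pySetD_natCast]
  · rw [hlast]
    by_cases hje : j = n.toNat - 1
    · subst hje
      rw [if_pos (by exact_mod_cast rfl), if_pos rfl]
    · rw [if_neg (by exact_mod_cast hje), if_neg hje, pvA1_get n hn j hj]
  · rw [pvA1_length]; omega

theorem pvA2_length (n : Int) (hn : 1 ≤ n) : (pvA2 n).length = n.toNat := by
  unfold pvA2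
  rw [pvSetD_neg_one _ _ (pvA1_ne_nil n hn), PySem.List.length_pySetD, pvA1_length]

theorem pvA3_inv (n : Int) (ht : List Int) (hn : 1 ≤ n) (m : Nat) :
    m ≤ n.toNat - 1 → ∀ j, j < n.toNat →
    PySem.List.pyGetD ((List.range m).foldl (fun cs (k : Nat) =>
      PySem.List.pySetD cs (1 + (k : Int))
        { PySem.List.pyGetD cs (1 + (k : Int)) ⟨-1, -1⟩ with L :=
          if (PySem.List.pyGetD ht ((1 + (k : Int)) - 1) 0 <
              PySem.List.pyGetD ht (1 + (k : Int)) 0) then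
            (PySem.List.pyGetD cs ((1 + (k : Int)) - 1) ⟨-1, -1⟩).L + 1
          else 1 }) (pvA2 n)) (j : Int) ⟨-1, -1⟩
    = (⟨if j ≤ m then pvL (pvH ht) j else -1,
        if j = n.toNat - 1 then 1 else -1⟩ : PVTemple) := by
  induction m with
  | zero =>
    intro _ j hj
    rw [List.range_zero, List.foldl_nil, pvA2_get n hn j hj]
    simp only [PVTemple.mk.injEq]
    refine ⟨?_, trivial⟩
    by_cases hj0 : j = 0
    · subst hj0
      rw [if_pos rfl, if_pos (le_refl 0)]
      rfl
    · rw [if_neg hj0, if_neg (by omega)]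
  | succ m ih =>
    intro hm j hj
    have hlen : ((List.range m).foldl (fun cs (k : Nat) =>
        PySem.List.pySetD cs (1 + (k : Int))
          { PySem.List.pyGetD cs (1 + (k : Int)) ⟨-1, -1⟩ with L :=
            if (PySem.List.pyGetD ht ((1 + (k : Int)) - 1) 0 <
                PySem.List.pyGetD ht (1 + (k : Int)) 0) then
              (PySem.List.pyGetD cs ((1 + (k : Int)) - 1) ⟨-1, -1⟩).L + 1
            else 1 }) (pvA2 n)).length = n.toNat := by
      rw [pvA_foldl_length _ _ (fun cs (k : Nat) => PySem.List.length_pySetD cs (1 + (k : Int)) _),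
          pvA2_length n hn]
    rw [List.range_succ, List.foldl_append, List.foldl_cons, List.foldl_nil]
    have eidx1 : (1 + (m : Int)) - 1 = ((m : Nat) : Int) := by omega
    have eidx : (1 + (m : Int)) = (((m + 1 : Nat)) : Int) := by omega
    have hprev : PySem.List.pyGetD ht ((1 + (m : Int)) - 1) 0 = pvH ht m := by
      rw [eidx1, PySem.List.pyGetD_natCast]; rfl
    have hcur : PySem.List.pyGetD ht (1 + (m : Int)) 0 = pvH ht (m + 1) := by
      rw [eidx, PySem.List.pyGetD_natCast]; rfl
    rw [hprev, hcur, eidx1, eidx, PySem.List.pyGetD_pySetD_natCast]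
    · have ih1 := ih (by omega) (m + 1) (by omega)
      have ih0 := ih (by omega) m (by omega)
      by_cases hjm : j = m + 1
      · subst hjm
        rw [if_pos (by exact_mod_cast rfl), ih1, ih0]
        simp only [PVTemple.mk.injEq]
        refine ⟨?_, trivial⟩
        rw [if_pos (le_refl (m + 1)), if_pos (le_refl m)]
        simp only [pvL]
      · rw [if_neg (by exact_mod_cast hjm), ih (by omega) j hj]
        simp only [PVTemple.mk.injEq]
        refine ⟨?_, trivial⟩
        by_cases hle : j ≤ m
        · rw [if_pos hle, if_pos (by omega)]
        · rw [if_neg hle, if_neg (by omega)]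
    · rw [hlen]; omega

theorem pvA3_get (n : Int) (ht : List Int) (hn : 1 ≤ n) (j : Nat) (hj : j < n.toNat) :
    PySem.List.pyGetD (pvA3 n ht) (j : Int) ⟨-1, -1⟩ =
      (⟨pvL (pvH ht) j, if j = n.toNat - 1 then 1 else -1⟩ : PVTemple) := by
  unfold pvA3
  rw [PySem.List.pyRange_one 1 n, List.foldl_map]
  have e1 : (n - 1).toNat = n.toNat - 1 := by omega
  rw [e1, pvA3_inv n ht hn (n.toNat - 1) le_rfl j hj, if_pos (by omega)]

theorem pvA4_inv (n : Int) (ht : List Int) (hn : 1 ≤ n) (m : Nat) :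
    m ≤ n.toNat - 1 → ∀ j, j < n.toNat →
    PySem.List.pyGetD ((List.range m).foldl (fun cs (k : Nat) =>
      PySem.List.pySetD cs (n - 2 - (k : Int))
        { PySem.List.pyGetD cs (n - 2 - (k : Int)) ⟨-1, -1⟩ with R :=
          if (PySem.List.pyGetD ht ((n - 2 - (k : Int)) + 1) 0 <
              PySem.List.pyGetD ht (n - 2 - (k : Int)) 0) then
            (PySem.List.pyGetD cs ((n - 2 - (k : Int)) + 1) ⟨-1, -1⟩).R + 1
          else 1 }) (pvA3 n ht)) (j : Int) ⟨-1, -1⟩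
    = (⟨pvL (pvH ht) j,
        if n.toNat - 1 - m ≤ j then pvR (pvH ht) (n.toNat - 1) j else -1⟩ : PVTemple) := by
  induction m with
  | zero =>
    intro _ j hj
    rw [List.range_zero, List.foldl_nil, pvA3_get n ht hn j hj]
    simp only [PVTemple.mk.injEq]
    refine ⟨trivial, ?_⟩
    by_cases hje : j = n.toNat - 1
    · subst hje
      rw [if_pos rfl, if_pos (by omega), pvR_of_ge _ _ _ le_rfl]
    · rw [if_neg hje, if_neg (by omega)]
  | succ m ih =>
    intro hm j hj
    have hlen : ((List.range m).foldl (fun cs (k : Nat) =>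
        PySem.List.pySetD cs (n - 2 - (k : Int))
          { PySem.List.pyGetD cs (n - 2 - (k : Int)) ⟨-1, -1⟩ with R :=
            if (PySem.List.pyGetD ht ((n - 2 - (k : Int)) + 1) 0 <
                PySem.List.pyGetD ht (n - 2 - (k : Int)) 0) then
              (PySem.List.pyGetD cs ((n - 2 - (k : Int)) + 1) ⟨-1, -1⟩).R + 1
            else 1 }) (pvA3 n ht)).length = n.toNat := by
      rw [pvA_foldl_length _ _
            (fun cs (k : Nat) => PySem.List.length_pySetD cs (n - 2 - (k : Int)) _)]
      unfold pvA3
      rw [pvA_foldl_length _ _ (fun cs (i : Int) => PySem.List.length_pySetD cs i _),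
          pvA2_length n hn]
    rw [List.range_succ, List.foldl_append, List.foldl_cons, List.foldl_nil]
    have eidx1 : (n - 2 - (m : Int)) + 1 = ((n.toNat - 1 - m : Nat) : Int) := by omega
    have eidx : (n - 2 - (m : Int)) = ((n.toNat - 2 - m : Nat) : Int) := by omega
    have hup : PySem.List.pyGetD ht ((n - 2 - (m : Int)) + 1) 0 = pvH ht (n.toNat - 1 - m) := by
      rw [eidx1, PySem.List.pyGetD_natCast]; rfl
    have hlo : PySem.List.pyGetD ht (n - 2 - (m : Int)) 0 = pvH ht (n.toNat - 2 - m) := by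
      rw [eidx, PySem.List.pyGetD_natCast]; rfl
    rw [hup, hlo, eidx1, eidx, PySem.List.pyGetD_pySetD_natCast]
    · have ih1 := ih (by omega) (n.toNat - 1 - m) (by omega)
      have ih0 := ih (by omega) (n.toNat - 2 - m) (by omega)
      by_cases hjm : j = n.toNat - 2 - m
      · subst hjm
        rw [if_pos (by exact_mod_cast rfl), ih1, ih0]
        simp only [PVTemple.mk.injEq]
        refine ⟨trivial, ?_⟩
        have e2 : n.toNat - 2 - m + 1 = n.toNat - 1 - m := by omega
        rw [if_pos (show n.toNat - 1 - (m + 1) ≤ n.toNat - 2 - m by omega),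
            if_pos (le_refl (n.toNat - 1 - m)),
            pvR_of_lt (pvH ht) (n.toNat - 1) (n.toNat - 2 - m) (by omega), e2]
      · rw [if_neg (by exact_mod_cast hjm), ih (by omega) j hj]
        simp only [PVTemple.mk.injEq]
        refine ⟨trivial, ?_⟩
        by_cases hle : n.toNat - 1 - m ≤ j
        · rw [if_pos hle, if_pos (by omega)]
        · rw [if_neg hle, if_neg (by omega)]
    · rw [hlen]; omega

theorem pvA4_get (n : Int) (ht : List Int) (hn : 1 ≤ n) (j : Nat) (hj : j < n.toNat) :
    PySem.List.pyGetD (pvA4 n ht) (j : Int) ⟨-1, -1⟩ =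
      (⟨pvL (pvH ht) j, pvR (pvH ht) (n.toNat - 1) j⟩ : PVTemple) := by
  unfold pvA4
  rw [PySem.List.pyRange_neg_one (n - 2) (-1), List.foldl_map]
  have e1 : (n - 2 - (-1)).toNat = n.toNat - 1 := by omega
  rw [e1, pvA4_inv n ht hn (n.toNat - 1) le_rfl j hj, if_pos (by omega)]

theorem offeringNumber_eq_pvT (n : Int) (ht : List Int) (hn : 1 ≤ n) :
    offeringNumber n ht = pvT (pvH ht) (n.toNat - 1) := by
  unfold offeringNumber
  have hnn : n = ((n.toNat : Nat) : Int) := by omega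
  rw [hnn, PySem.List.pyRange_zero_natCast, List.foldl_map, ← hnn]
  rw [PySem.List.foldl_add (List.range n.toNat)
        (fun k : Nat => max (PySem.List.pyGetD (pvA4 n ht) (k : Int) ⟨-1, -1⟩).L
          (PySem.List.pyGetD (pvA4 n ht) (k : Int) ⟨-1, -1⟩).R) 0]
  rw [zero_add]
  have hsum : ((List.range n.toNat).map
      (fun k : Nat => max (PySem.List.pyGetD (pvA4 n ht) (k : Int) ⟨-1, -1⟩).L
        (PySem.List.pyGetD (pvA4 n ht) (k : Int) ⟨-1, -1⟩).R)).sum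
      = ∑ j ∈ Finset.range n.toNat,
          max (PySem.List.pyGetD (pvA4 n ht) (j : Int) ⟨-1, -1⟩).L
            (PySem.List.pyGetD (pvA4 n ht) (j : Int) ⟨-1, -1⟩).R := rfl
  rw [hsum]
  unfold pvT
  have e1 : n.toNat = (n.toNat - 1) + 1 := by omega
  rw [← e1]
  apply Finset.sum_congr rfl
  intro j hj
  rw [pvA4_get n ht hn j (Finset.mem_range.mp hj)]

-- ===== VERDICT (by name: the statement is the Claim_ definition above) =====
theorem offeringNumber_spec : Claim_equal_offeringNumber := by
  intro n ht _ hpre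
  unfold Spec_offeringNumber
  rw [offeringNumber_eq_pvT n ht hpre.1, offeringNumber_alt_eq_pvT n ht hpre.1]
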